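-- pv_equiv track=rewrite | github.com/bradleyassaly/trading-project | src/trading_platform/research/alpha_lab/automation.py | _has_sector_inputs
-- ===== SOURCE A (Python) =====
-- def _has_sector_inputs(columns: set[str]) -> bool:
--     return any(
--         any(column.startswith(prefix) for column in columns)
--         for prefix in (
--             "sector_mean_return_",
--             "sector_momentum_",
--             "group_momentum_",
--             "industry_momentum_",
--             "benchmark_momentum_",
--             "sector_return_",
--             "group_return_",
--             "industry_return_",
--         )
--     ) or bool({"sector", "group", "industry", "sector_mean_return"} & columns)
-- ===== SOURCE B (Python) =====
-- _EXACT = frozenset({"sector", "group", "industry", "sector_mean_return"})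
-- _PREFIXES = frozenset({
--     "sector_mean_return_",
--     "sector_momentum_",
--     "group_momentum_",
--     "industry_momentum_",
--     "benchmark_momentum_",
--     "sector_return_",
--     "group_return_",
--     "industry_return_",
-- })
-- # Every prefix pattern ends with "_", so "col starts with some pattern" is equivalent to
-- # "some slice of col ending at an underscore is itself a pattern": scan col's characters once
-- # and hash-look-up col[:i+1] at each underscore, instead of trying each pattern with startswith.
--
--
-- def _matches(col):
--     return col in _EXACT or any(
--         ch == "_" and col[: i + 1] in _PREFIXES for i, ch in enumerate(col)
--     )
--
--
-- def _has_sector_inputs(columns: set[str]) -> bool: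
--     return any(_matches(col) for col in columns)
-- ===== Notes on version B (the rewrite author's own statement) =====
-- stated objective: alternative
-- what changed: Instead of testing each of the 8 prefixes against every column with startswith (plus a separate set intersection), B scans each column once and, at every underscore position i, hash-looks-up the slice col[:i+1] in a frozenset of the prefix patterns (all of which end in '_'), plus one exact-name set lookup per column.
import Mathlib
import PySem

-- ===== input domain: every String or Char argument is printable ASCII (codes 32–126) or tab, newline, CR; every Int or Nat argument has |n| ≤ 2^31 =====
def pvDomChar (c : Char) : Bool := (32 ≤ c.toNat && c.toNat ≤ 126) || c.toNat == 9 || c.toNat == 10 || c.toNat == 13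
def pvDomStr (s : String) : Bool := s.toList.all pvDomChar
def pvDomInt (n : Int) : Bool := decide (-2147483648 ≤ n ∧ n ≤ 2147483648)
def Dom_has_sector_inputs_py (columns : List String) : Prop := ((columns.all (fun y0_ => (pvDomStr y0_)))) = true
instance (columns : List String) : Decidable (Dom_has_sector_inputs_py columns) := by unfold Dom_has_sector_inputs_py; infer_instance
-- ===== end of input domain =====

-- ===== PORT A =====
-- One honest line: B replaces A's 8 per-prefix startswith scans (plus a separate set
-- intersection) with one scan per column that set-looks-up the slice col[:i+1] at each
-- underscore position (every prefix pattern ends in '_'); objective: alternative algorithm.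
def pvPrefixes : List String :=
  ["sector_mean_return_", "sector_momentum_", "group_momentum_", "industry_momentum_",
   "benchmark_momentum_", "sector_return_", "group_return_", "industry_return_"]

def pvExact : List String := ["sector", "group", "industry", "sector_mean_return"]

def has_sector_inputs_py (columns : List String) : Bool :=
  (pvPrefixes.any (fun pfx => columns.any (fun column => PySem.Str.startswith column pfx)))
    || (pvExact.any (fun name => columns.contains name))

-- ===== PORT B =====
-- B's frozensets of pattern strings; string equality is char-list equality, so the slice
-- lookups are represented exactly on List Char (the slice col[:i+1] is PySem.List.slice).
def pvPrefixSetB : List (List Char) :=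
  ["sector_mean_return_", "sector_momentum_", "group_momentum_", "industry_momentum_",
   "benchmark_momentum_", "sector_return_", "group_return_", "industry_return_"].map String.toList

def pvExactSetB : List String := ["sector", "group", "industry", "sector_mean_return"]

-- the generator expression over enumerate(col), as its own helper
def pvScan (cs : List Char) : Bool :=
  (PySem.List.enumerate cs 0).any (fun ic =>
    (ic.2 == '_') && pvPrefixSetB.contains (PySem.List.slice cs none (some (ic.1 + 1))))

def pvMatches (col : String) : Bool :=
  pvExactSetB.contains col || pvScan col.toList

def has_sector_inputs_py_alt (columns : List String) : Bool :=
  columns.any (fun col => pvMatches col)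

-- ===== PRECONDITION & SPEC =====
def Spec_has_sector_inputs_py (columns : List String) (out : Bool) : Prop := out = has_sector_inputs_py_alt columns
instance (columns : List String) (out : Bool) : Decidable (Spec_has_sector_inputs_py columns out) := by unfold Spec_has_sector_inputs_py; infer_instance

-- ===== CLAIM (what is proved, stated in full; the proofs are below) =====
def Claim_equal_has_sector_inputs_py : Prop := ∀ (columns : List String), Dom_has_sector_inputs_py columns → Spec_has_sector_inputs_py columns (has_sector_inputs_py columns)

-- ===== LEMMAS AND PROOFS =====

theorem pv_mem_enumerate_of_lt {α : Type} (xs : List α) (s : Int) (k : Nat) (h : k < xs.length) :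
    ((s + k : Int), xs[k]) ∈ PySem.List.enumerate xs s := by
  induction xs generalizing s k with
  | nil => simp at h
  | cons a t ih =>
    rw [PySem.List.enumerate_cons]
    cases k with
    | zero => simp
    | succ k' =>
      right
      have := ih (s + 1) k' (by simpa using h)
      have he : s + ((k' : Int) + 1) = s + 1 + (k' : Int) := by ring
      simpa [he] using this

theorem pv_of_mem_enumerate {α : Type} (xs : List α) (s : Int) (p : Int × α)
    (h : p ∈ PySem.List.enumerate xs s) :
    ∃ k : Nat, k < xs.length ∧ p.1 = s + k ∧ xs[k]? = some p.2 := by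
  induction xs generalizing s with
  | nil => simp [PySem.List.enumerate] at h
  | cons a t ih =>
    rw [PySem.List.enumerate_cons] at h
    rcases List.mem_cons.mp h with h0 | h1
    · exact ⟨0, by simp, by simp [h0], by simp [h0]⟩
    · obtain ⟨k, hk, h1', h2'⟩ := ih (s + 1) h1
      exact ⟨k + 1, by simpa using hk, by rw [h1']; push_cast; ring, by simpa using h2'⟩

theorem pv_scan_of_take (cs : List Char) (n : Nat) (hn : n ≤ cs.length) (h0 : 0 < n)
    (hu : cs[n-1]? = some '_') (hts : pvPrefixSetB.contains (cs.take n) = true) :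
    pvScan cs = true := by
  apply List.any_eq_true.mpr
  have hk : n - 1 < cs.length := by omega
  refine ⟨((0 + ((n-1 : Nat) : Int)), cs[n-1]), pv_mem_enumerate_of_lt cs 0 (n-1) hk, ?_⟩
  have hc : cs[n-1] = '_' := by
    have := List.getElem?_eq_getElem hk
    rw [hu] at this; exact (Option.some_inj.mp this).symm
  have hb : (0 + ((n-1 : Nat) : Int)) + 1 = (n : Int) := by omega
  rw [Bool.and_eq_true]
  constructor
  · simpa using hc
  · rw [hb, PySem.List.slice_to _ (by omega : (0:Int) ≤ (n:Int))]
    simpa using hts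

theorem pv_scan_of_prefix (cs p : List Char) (hmem : pvPrefixSetB.contains p = true)
    (h0 : 0 < p.length) (hu : p[p.length - 1]? = some '_')
    (hpre : p <+: cs) : pvScan cs = true := by
  obtain ⟨t, rfl⟩ := hpre
  apply pv_scan_of_take _ p.length (by simp) h0
  · rw [List.getElem?_append_left (by omega)]; exact hu
  · rw [List.take_left]; exact hmem

theorem pv_scan_iff (col : String) :
    pvScan col.toList = true ↔ ∃ p ∈ pvPrefixes, PySem.Str.startswith col p = true := by
  constructor
  · intro h
    obtain ⟨ic, hm, hf⟩ := List.any_eq_true.mp h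
    rw [Bool.and_eq_true] at hf
    obtain ⟨k, hk, h1, _⟩ := pv_of_mem_enumerate _ _ _ hm
    rw [h1] at hf
    have hb : (0 : Int) + (k : Int) + 1 = ((k + 1 : Nat) : Int) := by omega
    rw [hb, PySem.List.slice_to _ (by omega : (0:Int) ≤ ((k+1 : Nat) : Int))] at hf
    have hmem : col.toList.take (((k+1 : Nat) : Int)).toNat ∈ pvPrefixSetB :=
      List.mem_of_elem_eq_true hf.2
    have hpre : col.toList.take (((k+1 : Nat) : Int)).toNat <+: col.toList := List.take_prefix _ _
    simp only [pvPrefixSetB, List.mem_map, List.mem_cons] at hmem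
    obtain ⟨q, hq, hqe⟩ := hmem
    refine ⟨q, ?_, ?_⟩
    · simpa [pvPrefixes] using hq
    · rw [PySem.Str.startswith_eq]
      exact (PySem.Chars.startswith_iff _ _).mpr (hqe ▸ hpre)
  · rintro ⟨p, hp, hsw⟩
    rw [PySem.Str.startswith_eq] at hsw
    have hpre := (PySem.Chars.startswith_iff _ _).mp hsw
    fin_cases hp <;>
      exact pv_scan_of_prefix _ _ (by decide) (by decide) (by decide) hpre

-- ===== VERDICT (by name: the statement is the Claim_ definition above) =====
theorem has_sector_inputs_py_spec : Claim_equal_has_sector_inputs_py := by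
  intro columns _
  unfold Spec_has_sector_inputs_py has_sector_inputs_py has_sector_inputs_py_alt pvMatches
  apply Bool.eq_iff_iff.mpr
  simp only [List.any_eq_true, List.contains_eq_any_beq, Bool.or_eq_true]
  constructor
  · rintro (⟨p, hp, c, hc, hs⟩ | ⟨n, hn, c, hc, he⟩)
    · exact ⟨c, hc, Or.inr ((pv_scan_iff c).mpr ⟨p, hp, hs⟩)⟩
    · exact ⟨c, hc, Or.inl ⟨n, by simpa [pvExactSetB, pvExact] using hn, beq_iff_eq.mpr (beq_iff_eq.mp he).symm⟩⟩
  · rintro ⟨c, hc, (⟨n, hn, hne⟩ | hs)⟩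
    · exact Or.inr ⟨n, by simpa [pvExact, pvExactSetB] using hn, c, hc, beq_iff_eq.mpr (beq_iff_eq.mp hne).symm⟩
    · obtain ⟨p, hp, hsw⟩ := (pv_scan_iff c).mp hs
      exact Or.inl ⟨p, hp, c, hc, hsw⟩
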